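-- pv_equiv track=rewrite | github.com/nixternal/CodingChallenges | AdventOfCode/2016/06.py | part_two
-- ===== SOURCE A (Python) =====
-- from collections import Counter
--
-- def part_two(data: list) -> str:
--     """
--     Solves Part 2 of the puzzle by finding the least common character in each
--     column of the input data.
--
--     For each column (position) in the input strings, this function determines
--     the least frequently occurring character. If the input strings are of
--     unequal lengths, shorter strings are padded with a space (' ') to match
--     the length of the longest string.
--
--     Args:
--         data (list): A list of strings representing the puzzle input.
--
--     Returns:
--         str: A string composed of the least common character in each column.
--     """
--
--     result = []
--
--     # Determin the length of the longest string
--     max_len = max(len(s) for s in data)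
--
--     for i in range(max_len):
--         # Extract the i'th character from each string
--         column = [s[i] if i < len(s) else None for s in data]
--         # Use Counter to count occurrences of each character in a column
--         char_counts = Counter(column)
--         # Append the least common character. Lambda function doesn't give
--         # pyright error
--         result.append(min(char_counts, key=lambda k: char_counts[k]))
--         # The following works as well, it just gives a pyright error in neovim
--         # result.append(min(char_counts, key=char_counts.get))
--     return ''.join(result)
-- ===== SOURCE B (Python) =====
-- def part_two(data: list) -> str:
--     """Least common character per padded column, by sorting instead of counting:
--     sort each column's character codes (missing positions -> -1), scan the sorted
--     list for runs of equal codes (run length = frequency), and keep the run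
--     minimizing (length, first occurrence index in the column)."""
--     max_len = max(len(s) for s in data)
--     out = []
--     for i in range(max_len):
--         codes = [ord(s[i]) if i < len(s) else -1 for s in data]
--         scodes = sorted(codes)
--         n = len(scodes)
--         best = None
--         j = 0
--         while j < n:
--             k = j
--             while k < n and scodes[k] == scodes[j]:
--                 k += 1
--             cand = (k - j, codes.index(scodes[j]), scodes[j])
--             if best is None or cand < best:
--                 best = cand
--             j = k
--         out.append(chr(best[2]))
--     return ''.join(out)
-- ===== Notes on version B (the rewrite author's own statement) =====
-- stated objective: alternative
-- what changed: Replaces A's per-column Counter-and-min (hash counting) by a sorting algorithm: each padded column's character codes are sorted, frequencies are read off as run lengths of the sorted list, and the run minimizing (length, first-occurrence index) is kept.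
import Mathlib
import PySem

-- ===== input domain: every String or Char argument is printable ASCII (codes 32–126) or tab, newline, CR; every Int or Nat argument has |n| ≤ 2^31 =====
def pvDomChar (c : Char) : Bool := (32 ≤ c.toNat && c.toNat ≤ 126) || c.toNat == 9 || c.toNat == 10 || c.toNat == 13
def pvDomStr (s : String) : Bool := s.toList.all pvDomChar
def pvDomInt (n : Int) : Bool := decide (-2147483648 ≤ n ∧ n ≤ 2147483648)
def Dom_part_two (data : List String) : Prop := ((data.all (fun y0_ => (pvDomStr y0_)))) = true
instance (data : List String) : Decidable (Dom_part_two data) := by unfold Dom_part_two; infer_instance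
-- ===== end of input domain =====

-- B replaces A's per-column Counter-and-min by a sorting algorithm: sort each padded
-- column's character codes, read frequencies off as run lengths of the sorted list,
-- and keep the run minimizing (length, first-occurrence index); same value on Pre_.

-- ===== PORT A =====
-- column-major: for each i, extract the column, Counter it, take the least common key.
-- A `none` winner is Python's TypeError in ''.join (excluded by Pre_); the port writes ' ' there.
def part_two (data : List String) : String :=
  let maxLen : Int := (PySem.List.max? (data.map (fun s => PySem.Str.len s)) (fun x => x)).getD 0
  let result : List (Option Char) :=
    (PySem.List.pyRange 0 maxLen 1).map (fun i =>
      let column : List (Option Char) :=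
        data.map (fun s => if i < PySem.Str.len s then some (PySem.List.pyGetD s.toList i ' ') else none)
      let charCounts := PySem.Dict.counter column
      (PySem.List.min? charCounts.keys (fun k => charCounts.getD k 0)).getD none)
  String.ofList (result.map (fun o => o.getD ' '))

-- ===== PORT B =====
-- Python tuple '<' on the (count, first_index, code) int triples
def pvTLt (a b : Int × Int × Int) : Bool :=
  decide (a.1 < b.1 ∨ (a.1 = b.1 ∧ (a.2.1 < b.2.1 ∨ (a.2.1 = b.2.1 ∧ a.2.2 < b.2.2))))

-- 'if best is None or cand < best: best = cand'
def pvStep (best : Option (Int × Int × Int)) (cand : Int × Int × Int) : Option (Int × Int × Int) :=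
  match best with
  | none => some cand
  | some b => if pvTLt cand b then some cand else some b

-- the two nested while loops: peel one run of equal codes off the sorted list per step
def pvBestRun (codes : List Int) : List Int → Option (Int × Int × Int) → Option (Int × Int × Int)
  | [], best => best
  | c :: rest, best =>
      pvBestRun codes (rest.dropWhile (fun x => x == c))
        (pvStep best (1 + ((rest.takeWhile (fun x => x == c)).length : Int),
          (((PySem.List.index? codes c).getD 0 : Nat) : Int), c))
  termination_by s _ => s.length
  decreasing_by
    simp only [List.length_cons]
    exact Nat.lt_succ_of_le (List.length_dropWhile_le _ _)

-- chr(n); exact for the codes that occur here; Python raises on n < 0 (outside Pre_), ' ' fallback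
def pvChr (n : Int) : Char := if 0 ≤ n then Char.ofNat n.toNat else ' '

def part_two_alt (data : List String) : String :=
  let maxLen : Int := (PySem.List.max? (data.map (fun s => PySem.Str.len s)) (fun x => x)).getD 0
  String.ofList ((PySem.List.pyRange 0 maxLen 1).map (fun i =>
    let codes : List Int := data.map (fun s =>
      if i < PySem.Str.len s then ((PySem.List.pyGetD s.toList i ' ').toNat : Int) else -1)
    let scodes := PySem.List.sorted codes (fun x => x)
    -- 'best[2]' — best is never None here (the loop runs: codes ≠ [] whenever there is a column)
    pvChr ((pvBestRun codes scodes none).getD (0, 0, -1)).2.2))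

-- ===== PRECONDITION & SPEC =====
-- column i of the data, with `none` padding shorter strings (spec-level, not used by the ports)
def pvColumn (data : List String) (i : Nat) : List (Option Char) :=
  data.map (fun s => s.toList[i]?)

-- Pre_ excludes exactly the inputs where the Python raises: empty data (ValueError from max())
-- and inputs where some padded column's least common key is None (TypeError in ''.join).
def Pre_part_two (data : List String) : Prop :=
  data ≠ [] ∧
  ∀ i ∈ List.range ((PySem.List.max? (data.map (fun s => PySem.Str.len s)) (fun x => x)).getD 0).toNat,
    (pvColumn data i).count none = 0 ∨
    ∃ c ∈ pvColumn data i,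
      ((pvColumn data i).count c < (pvColumn data i).count none ∨
       ((pvColumn data i).count c = (pvColumn data i).count none ∧
        (pvColumn data i).idxOf c < (pvColumn data i).idxOf none))
instance (data : List String) : Decidable (Pre_part_two data) := by
  unfold Pre_part_two; infer_instance

def pvWitness_part_two : List String := ["ab", "ab", "cd"]

def Spec_part_two (data : List String) (out : String) : Prop := out = part_two_alt data
instance (data : List String) (out : String) : Decidable (Spec_part_two data out) := by unfold Spec_part_two; infer_instance

-- ===== CLAIM (what is proved, stated in full; the proofs are below) =====
def Claim_equal_part_two : Prop := ∀ (data : List String), Dom_part_two data → Pre_part_two data → Spec_part_two data (part_two data)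

-- ===== LEMMAS AND PROOFS =====

-- encode a padded column entry as B does: missing → -1, character → its code
def pvEnc : Option Char → Int
  | none => -1
  | some c => (c.toNat : Int)

theorem pvEnc_inj : Function.Injective pvEnc := by
  intro a b h
  cases a with
  | none =>
      cases b with
      | none => rfl
      | some c => exact absurd h (by simp [pvEnc])
  | some c =>
      cases b with
      | none => exact absurd h (by simp [pvEnc])
      | some d =>
          simp only [pvEnc, Nat.cast_inj] at h
          have h2 := congrArg Char.ofNat h
          rw [Char.ofNat_toNat, Char.ofNat_toNat] at h2
          exact h2 ▸ rfl

theorem pv_idxOf_map (l : List (Option Char)) (f : Option Char → Int)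
    (hf : Function.Injective f) (x : Option Char) :
    (l.map f).idxOf (f x) = l.idxOf x := by
  induction l with
  | nil => simp
  | cons a t ih =>
      by_cases hx : a = x
      · simp [hx]
      · rw [List.map_cons, List.idxOf_cons_ne _ (fun hc => hx (hf hc)),
          List.idxOf_cons_ne _ hx, ih]

theorem pv_index?_getD (l : List Int) (v : Int) (h : v ∈ l) :
    (PySem.List.index? l v).getD 0 = l.idxOf v := by
  rw [PySem.List.index?_eq_idxOf?]
  induction l with
  | nil => simp at h
  | cons a t ih =>
      by_cases hx : a = v
      · simp [List.idxOf?_cons, hx]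
      · rw [List.idxOf?_cons]
        simp only [beq_iff_eq, hx, ite_false]
        rw [List.idxOf_cons_ne _ hx]
        rcases List.mem_cons.mp h with h1 | h2
        · exact absurd h1.symm hx
        · specialize ih h2
          cases hio : List.idxOf? v t with
          | none => rw [List.idxOf?_eq_none_iff] at hio; exact absurd h2 hio
          | some k => simp [hio] at ih ⊢; omega

-- min(xs, key) is the FIRST key-minimal element: along any Pairwise order r on xs,
-- the winner is strictly smaller than, or r-before, every other element.
theorem pv_minAux {α : Type} (key : α → Int) (r : α → α → Prop) :
    ∀ (t : List α) (b m : α), t.Pairwise r → (∀ v ∈ t, r b v) →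
      t.foldl (fun acc x => match acc with
        | none => some x
        | some m' => if key x < key m' then some x else some m') (some b) = some m →
      (m = b ∨ m ∈ t) ∧ key m ≤ key b ∧ (key m = key b → m = b) ∧
      ∀ v ∈ t, key m ≤ key v ∧ (key m = key v → m = v ∨ r m v) := by
  intro t
  induction t with
  | nil =>
      intro b m _ _ h
      simp at h
      subst h
      exact ⟨Or.inl rfl, le_refl _, fun _ => rfl, by simp⟩
  | cons v t' ih =>
      intro b m hp hb h
      rw [List.foldl_cons] at h
      by_cases hlt : key v < key b
      · simp only [hlt, if_pos] at h
        obtain ⟨hmem, hle, heq, hall⟩ := ih v m hp.of_cons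
          (fun w hw => (List.pairwise_cons.mp hp).1 w hw) h
        refine ⟨?_, ?_, ?_, ?_⟩
        · rcases hmem with h1 | h1
          · exact Or.inr (h1 ▸ List.mem_cons_self)
          · exact Or.inr (List.mem_cons_of_mem _ h1)
        · omega
        · omega
        · intro w hw
          rcases List.mem_cons.mp hw with h1 | h1
          · subst h1
            exact ⟨hle, fun he => Or.inl (heq he)⟩
          · exact hall w h1
      · simp only [hlt, ite_false] at h
        obtain ⟨hmem, hle, heq, hall⟩ := ih b m hp.of_cons
          (fun w hw => hb w (List.mem_cons_of_mem _ hw)) h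
        refine ⟨?_, hle, heq, ?_⟩
        · rcases hmem with h1 | h1
          · exact Or.inl h1
          · exact Or.inr (List.mem_cons_of_mem _ h1)
        · intro w hw
          rcases List.mem_cons.mp hw with h1 | h1
          · subst h1
            constructor
            · omega
            · intro he
              have hmb : m = b := heq (by omega)
              exact Or.inr (hmb ▸ hb w List.mem_cons_self)
          · exact hall w h1

theorem pv_min?_spec {α : Type} (key : α → Int) (r : α → α → Prop)
    (xs : List α) (m : α) (hp : xs.Pairwise r)
    (h : PySem.List.min? xs key = some m) :
    m ∈ xs ∧ ∀ v ∈ xs, key m ≤ key v ∧ (key m = key v → m = v ∨ r m v) := by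
  cases xs with
  | nil => simp [PySem.List.min?] at h
  | cons x t =>
      rw [PySem.List.min?, List.foldl_cons] at h
      obtain ⟨hmem, hle, heq, hall⟩ := pv_minAux key r t x m hp.of_cons
        (fun w hw => (List.pairwise_cons.mp hp).1 w hw) h
      refine ⟨?_, ?_⟩
      · rcases hmem with h1 | h1
        · exact h1 ▸ List.mem_cons_self
        · exact List.mem_cons_of_mem _ h1
      · intro v hv
        rcases List.mem_cons.mp hv with h1 | h1
        · subst h1
          exact ⟨hle, fun he => Or.inl (heq he)⟩
        · exact hall v h1

-- set(xs) lists elements in order of strictly increasing first-occurrence index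
theorem pv_ofList_pairwise (l : List (Option Char)) :
    (PySem.Set.ofList l).Pairwise (fun a b => l.idxOf a < l.idxOf b) := by
  induction l using List.reverseRecOn with
  | nil => simp [PySem.Set.ofList]
  | append_singleton l x ih =>
      have hof : PySem.Set.ofList (l ++ [x]) = PySem.Set.add (PySem.Set.ofList l) x := by
        simp [PySem.Set.ofList, List.foldl_append]
      rw [hof]
      have htrans : (PySem.Set.ofList l).Pairwise (fun a b => (l ++ [x]).idxOf a < (l ++ [x]).idxOf b) := by
        refine List.Pairwise.imp_of_mem (fun ha hb hr => ?_) ih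
        rw [List.idxOf_append_of_mem ((PySem.Set.mem_ofList _ _).mp ha),
          List.idxOf_append_of_mem ((PySem.Set.mem_ofList _ _).mp hb)]
        exact hr
      by_cases hx : x ∈ PySem.Set.ofList l
      · rw [show PySem.Set.add (PySem.Set.ofList l) x = PySem.Set.ofList l from by
          simp [PySem.Set.add, hx]]
        exact htrans
      · rw [show PySem.Set.add (PySem.Set.ofList l) x = PySem.Set.ofList l ++ [x] from by
          simp [PySem.Set.add, hx]]
        rw [List.pairwise_append]
        refine ⟨htrans, List.pairwise_singleton _ _, fun a ha b hb => ?_⟩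
        have hxl : x ∉ l := fun hc => hx ((PySem.Set.mem_ofList _ _).mpr hc)
        have hal : a ∈ l := (PySem.Set.mem_ofList _ _).mp ha
        rw [List.mem_singleton] at hb
        subst hb
        rw [List.idxOf_append_of_mem hal, List.idxOf_append_of_notMem hxl]
        have := List.idxOf_lt_length_of_mem hal
        simp
        omega

-- pvTLt is asymmetric and irreflexive
theorem pvTLt_asymm {a b : Int × Int × Int} (h : pvTLt a b = true) : pvTLt b a = false := by
  simp [pvTLt] at h ⊢; omega

theorem pvTLt_irrefl (a : Int × Int × Int) : pvTLt a a = false := by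
  simp [pvTLt]

theorem pvPick_aux (cm : Int × Int × Int) :
    ∀ (t : List (Int × Int × Int)) (b : Int × Int × Int),
      (b = cm ∨ (cm ∈ t ∧ pvTLt cm b = true)) →
      (∀ x ∈ t, x ≠ cm → pvTLt cm x = true) →
      t.foldl pvStep (some b) = some cm := by
  intro t
  induction t with
  | nil =>
      intro b hb _
      rcases hb with h | ⟨h, _⟩
      · simp [h]
      · simp at h
  | cons x t' ih =>
      intro b hb hall
      rw [List.foldl_cons]
      by_cases hx : x = cm
      · have hstep : pvStep (some b) x = some cm := by
          rcases hb with h | ⟨_, hlt⟩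
          · simp [pvStep, h, hx, pvTLt_irrefl]
          · simp [pvStep, hx, hlt]
        rw [hstep]
        exact ih cm (Or.inl rfl) (fun w hw hne => hall w (List.mem_cons_of_mem _ hw) hne)
      · have hcx : pvTLt cm x = true := hall x List.mem_cons_self hx
        have hxc : pvTLt x cm = false := pvTLt_asymm hcx
        rcases hb with h | ⟨hmem, hlt⟩
        · have hstep : pvStep (some b) x = some cm := by simp [pvStep, h, hxc]
          rw [hstep]
          exact ih cm (Or.inl rfl) (fun w hw hne => hall w (List.mem_cons_of_mem _ hw) hne)
        · have hmem' : cm ∈ t' := by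
            rcases List.mem_cons.mp hmem with h1 | h1
            · exact absurd h1.symm hx
            · exact h1
          simp only [pvStep]
          split
          · exact ih x (Or.inr ⟨hmem', hcx⟩) (fun w hw hne => hall w (List.mem_cons_of_mem _ hw) hne)
          · exact ih b (Or.inr ⟨hmem', hlt⟩) (fun w hw hne => hall w (List.mem_cons_of_mem _ hw) hne)

theorem pvPick_determined (cm : Int × Int × Int) (cs : List (Int × Int × Int))
    (hm : cm ∈ cs) (hall : ∀ x ∈ cs, x ≠ cm → pvTLt cm x = true) :
    cs.foldl pvStep none = some cm := by
  cases cs with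
  | nil => simp at hm
  | cons c t =>
      rw [List.foldl_cons]
      have hstep : pvStep none c = some c := rfl
      rw [hstep]
      by_cases hc : c = cm
      · exact pvPick_aux cm t c (Or.inl hc) (fun w hw hne => hall w (List.mem_cons_of_mem _ hw) hne)
      · have hmem : cm ∈ t := by
          rcases List.mem_cons.mp hm with h1 | h1
          · exact absurd h1.symm hc
          · exact h1
        exact pvPick_aux cm t c (Or.inr ⟨hmem, hall c List.mem_cons_self hc⟩)
          (fun w hw hne => hall w (List.mem_cons_of_mem _ hw) hne)

-- the candidate triple of a value: its frequency in s, its first index in codes, itself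
def pvCand (codes s : List Int) (v : Int) : Int × Int × Int :=
  ((s.count v : Int), ((codes.idxOf v : Nat) : Int), v)

-- the run scan over a sorted list is a fold of the candidates of its distinct values
theorem pv_add_cons (c : Int) : ∀ (l : List Int) (acc : List Int), c ∉ l →
    l.foldl PySem.Set.add (c :: acc) = c :: l.foldl PySem.Set.add acc := by
  intro l
  induction l with
  | nil => intro acc _; rfl
  | cons x t ih =>
      intro acc hc
      have hxc : x ≠ c := fun h => hc (h ▸ List.mem_cons_self)
      rw [List.foldl_cons, List.foldl_cons]
      have hb : (x == c) = false := by simpa using hxc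
      have hstep : PySem.Set.add (c :: acc) x = c :: PySem.Set.add acc x := by
        by_cases hm : x ∈ acc
        · simp [PySem.Set.add, hm, hxc]
        · simp [PySem.Set.add, hm, hxc]
      rw [hstep, ih _ (fun h => hc (List.mem_cons_of_mem _ h))]

theorem pv_add_skip : ∀ (l : List Int) (acc : List Int), (∀ x ∈ l, x ∈ acc) →
    l.foldl PySem.Set.add acc = acc := by
  intro l
  induction l with
  | nil => intro acc _; rfl
  | cons x t ih =>
      intro acc h
      rw [List.foldl_cons]
      have hstep : PySem.Set.add acc x = acc := by
        simp [PySem.Set.add, h x List.mem_cons_self]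
      rw [hstep]
      exact ih acc (fun w hw => h w (List.mem_cons_of_mem _ hw))

theorem pvBestRun_eq_aux (codes : List Int) :
    ∀ (n : Nat) (s : List Int), s.length ≤ n → s.Pairwise (· ≤ ·) → (∀ x ∈ s, x ∈ codes) →
      ∀ best, pvBestRun codes s best = ((PySem.List.dedup s).map (pvCand codes s)).foldl pvStep best := by
  intro n
  induction n with
  | zero =>
      intro s hn _ _ best
      have hs : s = [] := List.eq_nil_of_length_eq_zero (Nat.le_zero.mp hn)
      subst hs
      rw [pvBestRun]
      rfl
  | succ n ih =>
      intro s hn hp hmem best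
      cases s with
      | nil => rw [pvBestRun]; rfl
      | cons c rest =>
          have hsplit : rest.takeWhile (fun x => x == c) ++ rest.dropWhile (fun x => x == c) = rest :=
            List.takeWhile_append_dropWhile
          set same := rest.takeWhile (fun x => x == c) with hsame
          set other := rest.dropWhile (fun x => x == c) with hother
          have f1 : ∀ x ∈ same, c = x := by
            intro x hx
            have hxc : x = c := by simpa using List.mem_takeWhile_imp hx
            exact hxc.symm
          have f2 : c ∉ other := by
            intro hc
            cases ho : other with
            | nil => rw [ho] at hc; simp at hc
            | cons h t =>
                have hdrop : rest.dropWhile (fun x => x == c) = h :: t := by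
                  rw [← hother]; exact ho
                have hpa : (h == c) = false := by
                  have h2 := List.head_dropWhile_not (fun x => x == c) (l := rest) (by simp [hdrop])
                  simp only [hdrop, List.head_cons] at h2
                  exact h2
                have hne : h ≠ c := by simpa using hpa
                rw [ho] at hc
                rcases List.mem_cons.mp hc with h1 | h1
                · exact hne h1.symm
                have hop : other.Pairwise (· ≤ ·) :=
                  (hp.of_cons).sublist (List.dropWhile_sublist _)
                rw [ho] at hop
                have hle1 : h ≤ c := (List.pairwise_cons.mp hop).1 c h1
                have hmemrest : h ∈ rest := (List.dropWhile_sublist _).subset (by rw [← hother, ho]; exact List.mem_cons_self)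
                have hle2 : c ≤ h := (List.pairwise_cons.mp hp).1 h hmemrest
                exact hne (le_antisymm hle1 hle2)
          have f4 : (c :: rest).count c = 1 + same.length := by
            rw [List.count_cons_self, ← hsplit, List.count_append]
            rw [List.count_eq_length.mpr f1, List.count_eq_zero.mpr f2]
            omega
          have f5 : ∀ v, v ≠ c → (c :: rest).count v = other.count v := by
            intro v hv
            rw [List.count_cons_of_ne hv.symm, ← hsplit, List.count_append]
            have : same.count v = 0 := List.count_eq_zero.mpr (fun hx => hv (f1 v hx).symm)
            omega
          have f3 : PySem.List.dedup (c :: rest) = c :: PySem.List.dedup other := by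
            show List.foldl PySem.Set.add PySem.Set.empty (c :: rest) = _
            rw [List.foldl_cons]
            have h0 : PySem.Set.add PySem.Set.empty c = [c] := rfl
            rw [h0, ← hsplit, List.foldl_append, pv_add_skip same [c] (fun x hx => by rw [← f1 x hx]; exact List.mem_cons_self), pv_add_cons c other [] f2]
            rfl
          have hop : other.Pairwise (· ≤ ·) := (hp.of_cons).sublist (List.dropWhile_sublist _)
          have homem : ∀ x ∈ other, x ∈ codes := fun x hx =>
            hmem x (List.mem_cons_of_mem _ ((List.dropWhile_sublist _).subset hx))
          have holen : other.length ≤ n := by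
            have h1 : other.length ≤ rest.length := by
              rw [hother]; exact List.length_dropWhile_le _ _
            simp only [List.length_cons] at hn
            omega
          have hcandeq : ((1 : Int) + (same.length : Int),
              (((PySem.List.index? codes c).getD 0 : Nat) : Int), c) = pvCand codes (c :: rest) c := by
            unfold pvCand
            rw [pv_index?_getD codes c (hmem c List.mem_cons_self), f4]
            push_cast
            ring_nf
          have hmapeq : (PySem.List.dedup other).map (pvCand codes (c :: rest)) =
              (PySem.List.dedup other).map (pvCand codes other) := by
            refine List.map_congr_left (fun v hv => ?_)
            have hvo : v ∈ other := by
              have : v ∈ PySem.Set.ofList other := hv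
              exact (PySem.Set.mem_ofList _ _).mp this
            have hvc : v ≠ c := fun h => f2 (h ▸ hvo)
            unfold pvCand
            rw [f5 v hvc]
          rw [pvBestRun, ih other holen hop homem, f3, List.map_cons, List.foldl_cons, hcandeq, hmapeq]

theorem pvBestRun_eq (codes s : List Int) (hp : s.Pairwise (· ≤ ·)) (hmem : ∀ x ∈ s, x ∈ codes)
    (best : Option (Int × Int × Int)) :
    pvBestRun codes s best = ((PySem.List.dedup s).map (pvCand codes s)).foldl pvStep best :=
  pvBestRun_eq_aux codes s.length s (le_refl _) hp hmem best

-- the per-column agreement of the two ports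
theorem pv_column_eq (col : List (Option Char)) (hcol : col ≠ []) :
    pvChr ((pvBestRun (col.map pvEnc)
        (PySem.List.sorted (col.map pvEnc) (fun x => x)) none).getD (0, 0, -1)).2.2
      = ((PySem.List.min? (PySem.Dict.counter col).keys
          (fun k => (PySem.Dict.counter col).getD k 0)).getD none).getD ' ' := by
  have hkeys : (PySem.Dict.counter col).keys = PySem.Set.ofList col :=
    PySem.Dict.keys_counter col
  have hkeyfun : (fun k => (PySem.Dict.counter col).getD k 0) =
      (fun k : Option Char => ((col.count k : Nat) : Int)) :=
    funext (fun k => PySem.Dict.getD_counter col k)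
  rw [hkeys, hkeyfun]
  cases hmin : PySem.List.min? (PySem.Set.ofList col)
      (fun k : Option Char => ((col.count k : Nat) : Int)) with
  | none =>
      exfalso
      rw [PySem.List.min?_eq_none_iff] at hmin
      cases col with
      | nil => exact hcol rfl
      | cons a t =>
          have : a ∈ PySem.Set.ofList (a :: t) :=
            (PySem.Set.mem_ofList _ _).mpr List.mem_cons_self
          rw [hmin] at this
          simp at this
  | some m =>
      obtain ⟨hm_mem, hspec⟩ := pv_min?_spec (fun k : Option Char => ((col.count k : Nat) : Int))
        (fun a b => col.idxOf a < col.idxOf b) (PySem.Set.ofList col) m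
        (pv_ofList_pairwise col) hmin
      have hm_col : m ∈ col := (PySem.Set.mem_ofList _ _).mp hm_mem
      have hsp : (PySem.List.sorted (col.map pvEnc) (fun x => x)).Pairwise (· ≤ ·) :=
        PySem.List.sorted_pairwise (col.map pvEnc) (fun x => x)
      have hsmem : ∀ x ∈ PySem.List.sorted (col.map pvEnc) (fun x => x), x ∈ col.map pvEnc :=
        fun x hx => (PySem.List.mem_sorted _ _ _ _).mp hx
      rw [pvBestRun_eq (col.map pvEnc) (PySem.List.sorted (col.map pvEnc) (fun x => x)) hsp hsmem none]
      have hperm : (PySem.List.sorted (col.map pvEnc) (fun x => x)).Perm (col.map pvEnc) :=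
        PySem.List.sorted_perm (col.map pvEnc) (fun x => x) false
      have hcount : ∀ u : Option Char,
          (PySem.List.sorted (col.map pvEnc) (fun x => x)).count (pvEnc u) = col.count u := by
        intro u
        rw [hperm.count_eq]
        exact List.count_map_of_injective col pvEnc pvEnc_inj u
      have hidx : ∀ u : Option Char, (col.map pvEnc).idxOf (pvEnc u) = col.idxOf u :=
        fun u => pv_idxOf_map col pvEnc pvEnc_inj u
      have hcm_mem : pvCand (col.map pvEnc) (PySem.List.sorted (col.map pvEnc) (fun x => x)) (pvEnc m)
          ∈ (PySem.List.dedup (PySem.List.sorted (col.map pvEnc) (fun x => x))).map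
            (pvCand (col.map pvEnc) (PySem.List.sorted (col.map pvEnc) (fun x => x))) := by
        refine List.mem_map_of_mem ?_
        have h1 : pvEnc m ∈ col.map pvEnc := List.mem_map_of_mem hm_col
        have h2 : pvEnc m ∈ PySem.List.sorted (col.map pvEnc) (fun x => x) :=
          (PySem.List.mem_sorted _ _ _ _).mpr h1
        exact (PySem.Set.mem_ofList _ _).mpr h2
      have hall : ∀ x ∈ (PySem.List.dedup (PySem.List.sorted (col.map pvEnc) (fun x => x))).map
            (pvCand (col.map pvEnc) (PySem.List.sorted (col.map pvEnc) (fun x => x))),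
          x ≠ pvCand (col.map pvEnc) (PySem.List.sorted (col.map pvEnc) (fun x => x)) (pvEnc m) →
          pvTLt (pvCand (col.map pvEnc) (PySem.List.sorted (col.map pvEnc) (fun x => x)) (pvEnc m)) x = true := by
        intro x hx hne
        obtain ⟨v, hv, rfl⟩ := List.mem_map.mp hx
        have hv_s : v ∈ PySem.List.sorted (col.map pvEnc) (fun x => x) :=
          (PySem.Set.mem_ofList _ _).mp hv
        have hv_codes : v ∈ col.map pvEnc := (PySem.List.mem_sorted _ _ _ _).mp hv_s
        obtain ⟨u, hu_col, rfl⟩ := List.mem_map.mp hv_codes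
        have hum : u ≠ m := by
          intro h
          exact hne (by rw [h])
        obtain ⟨hle, htie⟩ := hspec u ((PySem.Set.mem_ofList _ _).mpr hu_col)
        have hle' : col.count m ≤ col.count u := by exact_mod_cast hle
        have htie' : col.count m = col.count u → col.idxOf m < col.idxOf u := by
          intro h
          rcases htie (by exact_mod_cast h) with h1 | h1
          · exact absurd h1.symm hum
          · exact h1
        simp only [pvCand, pvTLt, hcount, hidx, decide_eq_true_eq]
        by_cases hc : col.count m = col.count u
        · have := htie' hc
          right
          constructor
          · exact_mod_cast hc
          · left
            exact_mod_cast this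
        · left
          have : col.count m < col.count u := lt_of_le_of_ne hle' hc
          exact_mod_cast this
      rw [pvPick_determined _ _ hcm_mem hall]
      simp only [Option.getD_some, pvCand]
      cases m with
      | none => rfl
      | some c =>
          simp only [pvEnc, pvChr, Option.getD_some]
          rw [if_pos (by positivity)]
          rw [Int.toNat_natCast, Char.ofNat_toNat]

theorem pv_ports_eq (data : List String) : part_two data = part_two_alt data := by
  cases data with
  | nil => rfl
  | cons d ds =>
      simp only [part_two, part_two_alt]
      rw [List.map_map]
      refine congrArg String.ofList (List.map_congr_left (fun i hi => ?_))
      simp only [Function.comp]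
      have hcodes : (d :: ds).map (fun s =>
            if i < PySem.Str.len s then ((PySem.List.pyGetD s.toList i ' ').toNat : Int) else -1)
          = ((d :: ds).map (fun s =>
            if i < PySem.Str.len s then some (PySem.List.pyGetD s.toList i ' ') else none)).map pvEnc := by
        rw [List.map_map]
        refine List.map_congr_left (fun s _ => ?_)
        simp only [Function.comp_apply]
        rw [apply_ite pvEnc]
        rfl
      rw [hcodes]
      exact (pv_column_eq ((d :: ds).map (fun s =>
        if i < PySem.Str.len s then some (PySem.List.pyGetD s.toList i ' ') else none)) (by simp)).symm

-- ===== VERDICT (by name: the statement is the Claim_ definition above) =====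
theorem part_two_spec : Claim_equal_part_two := by
  intro data _ _
  unfold Spec_part_two
  exact pv_ports_eq data
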